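-- pv_equiv track=rewrite | github.com/guihunkun/LearnPython | merge_data/main.py | merge_data_by_map
-- ===== SOURCE A (Python) =====
-- def merge_data_by_map(data1, data2, head1, head2, data1_same_id, data2_same_id):
--   datas = []
--   dict_map = {}
--   for i in range(len(data1)) :
--     data = []
--     for j in range(len(data1[i])):
--       if j != data1_same_id :
--         data.append(data1[i][j])
--     dict_map[str(data1[i][data1_same_id])] = data
--
--   for i in range(len(data2)):
--     data = data2[i].copy()
--     key = data[data2_same_id]
--     if dict_map.get( key ) is not None:
--       val = dict_map[key]
--       for j in range(len(val)) :
--         data.append(val[j])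
--       datas.append(data)
--   return datas
-- ===== SOURCE B (Python) =====
-- def merge_data_by_map(data1, data2, head1, head2, data1_same_id, data2_same_id):
--     result = []
--     for row2 in data2:
--         key = row2[data2_same_id]
--         matched = None
--         for row1 in data1:
--             if str(row1[data1_same_id]) == key:
--                 matched = row1
--         if matched is not None:
--             result.append(row2 + [f for j, f in enumerate(matched) if j != data1_same_id])
--     return result
-- ===== Notes on version B (the rewrite author's own statement) =====
-- stated objective: alternative
-- what changed: Replaces A's pre-built dict index (str(id) -> non-id fields) with a direct nested-loop join: for each data2 row, scan data1 and keep the last row whose id field equals the key, then append its non-id fields via an enumerate comprehension.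
import Mathlib
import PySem

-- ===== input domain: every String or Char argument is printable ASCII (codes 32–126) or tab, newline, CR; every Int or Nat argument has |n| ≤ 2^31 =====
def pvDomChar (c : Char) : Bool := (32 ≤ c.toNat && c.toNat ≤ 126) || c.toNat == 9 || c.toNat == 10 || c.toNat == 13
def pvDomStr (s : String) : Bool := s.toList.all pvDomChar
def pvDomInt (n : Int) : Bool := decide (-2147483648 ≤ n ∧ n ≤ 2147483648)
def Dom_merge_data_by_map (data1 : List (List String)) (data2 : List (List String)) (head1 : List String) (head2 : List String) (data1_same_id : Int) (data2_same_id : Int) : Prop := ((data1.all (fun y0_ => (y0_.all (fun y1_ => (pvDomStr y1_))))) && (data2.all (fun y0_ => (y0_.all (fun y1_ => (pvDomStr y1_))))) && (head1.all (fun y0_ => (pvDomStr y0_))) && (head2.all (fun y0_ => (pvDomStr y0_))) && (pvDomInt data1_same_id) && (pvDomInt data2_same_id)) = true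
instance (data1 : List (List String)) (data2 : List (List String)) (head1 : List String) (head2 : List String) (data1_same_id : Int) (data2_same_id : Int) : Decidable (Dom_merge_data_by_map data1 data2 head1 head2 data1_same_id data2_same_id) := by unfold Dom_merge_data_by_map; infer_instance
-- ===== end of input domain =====

-- B replaces A's pre-built dict index by a direct nested-loop join (last match wins),
-- same output on every non-raising input; objective: alternative (no speed claim).


-- ===== PORT A =====
-- inner loop 'for j in range(len(row)): if j != data1_same_id: data.append(row[j])'
def mergeNonIdA (row : List String) (id : Int) : List String :=
  (PySem.List.pyRange 0 (PySem.List.len row) 1).foldl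
    (fun data j => if j ≠ id then data ++ [PySem.List.pyGetD row j ""] else data) []

def merge_data_by_map (data1 : List (List String)) (data2 : List (List String)) (head1 : List String) (head2 : List String) (data1_same_id : Int) (data2_same_id : Int) : List (List String) :=
  let dict_map : PySem.Dict String (List String) :=
    data1.foldl (fun d row =>
      d.insert (PySem.List.pyGetD row data1_same_id "") (mergeNonIdA row data1_same_id))
      PySem.Dict.empty
  data2.foldl (fun datas row =>
    let data := row
    let key := PySem.List.pyGetD data data2_same_id ""
    match dict_map.get? key with
    | some val =>
        datas ++ [(PySem.List.pyRange 0 (PySem.List.len val) 1).foldl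
          (fun d j => d ++ [PySem.List.pyGetD val j ""]) data]
    | none => datas) []

-- ===== PORT B =====
-- '[f for j, f in enumerate(matched) if j != data1_same_id]'
def altNonId (row : List String) (id : Int) : List String :=
  ((PySem.List.enumerate row 0).filter (fun p => p.1 != id)).map Prod.snd

-- the inner scan: last row of data1 whose id field equals key
def altLastMatch (data1 : List (List String)) (id : Int) (key : String) : Option (List String) :=
  data1.foldl (fun m row1 => if PySem.List.pyGetD row1 id "" == key then some row1 else m) none

def merge_data_by_map_alt (data1 : List (List String)) (data2 : List (List String)) (head1 : List String) (head2 : List String) (data1_same_id : Int) (data2_same_id : Int) : List (List String) :=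
  data2.foldl (fun result row2 =>
    let key := PySem.List.pyGetD row2 data2_same_id ""
    match altLastMatch data1 data1_same_id key with
    | some m => result ++ [row2 ++ altNonId m data1_same_id]
    | none => result) []

-- ===== PRECONDITION & SPEC =====
-- Pre_: exactly the inputs where Python A raises no IndexError (both id indices valid for every row).
def Pre_merge_data_by_map (data1 : List (List String)) (data2 : List (List String)) (head1 : List String) (head2 : List String) (data1_same_id : Int) (data2_same_id : Int) : Prop :=
  (∀ r ∈ data1, PySem.Raise.InRange r.length data1_same_id) ∧
  (∀ r ∈ data2, PySem.Raise.InRange r.length data2_same_id)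
instance (data1 : List (List String)) (data2 : List (List String)) (head1 : List String) (head2 : List String) (data1_same_id : Int) (data2_same_id : Int) : Decidable (Pre_merge_data_by_map data1 data2 head1 head2 data1_same_id data2_same_id) := by unfold Pre_merge_data_by_map; infer_instance
def pvWitness_merge_data_by_map : List (List String) × List (List String) × List String × List String × Int × Int :=
  ([["1", "x"], ["2", "y"]], [["1", "u"], ["3", "v"]], ["id", "a"], ["id", "b"], 0, 0)

def Spec_merge_data_by_map (data1 : List (List String)) (data2 : List (List String)) (head1 : List String) (head2 : List String) (data1_same_id : Int) (data2_same_id : Int) (out : List (List String)) : Prop := out = merge_data_by_map_alt data1 data2 head1 head2 data1_same_id data2_same_id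
instance (data1 : List (List String)) (data2 : List (List String)) (head1 : List String) (head2 : List String) (data1_same_id : Int) (data2_same_id : Int) (out : List (List String)) : Decidable (Spec_merge_data_by_map data1 data2 head1 head2 data1_same_id data2_same_id out) := by unfold Spec_merge_data_by_map; infer_instance

-- ===== CLAIM (what is proved, stated in full; the proofs are below) =====
def Claim_equal_merge_data_by_map : Prop := ∀ (data1 : List (List String)) (data2 : List (List String)) (head1 : List String) (head2 : List String) (data1_same_id : Int) (data2_same_id : Int), Dom_merge_data_by_map data1 data2 head1 head2 data1_same_id data2_same_id → Pre_merge_data_by_map data1 data2 head1 head2 data1_same_id data2_same_id → Spec_merge_data_by_map data1 data2 head1 head2 data1_same_id data2_same_id (merge_data_by_map data1 data2 head1 head2 data1_same_id data2_same_id)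

-- ===== LEMMAS AND PROOFS =====

-- A's inner filter loop equals B's comprehension over enumerate
lemma foldl_ite_ne (l : List Int) (id : Int) (f : Int → String) (acc : List String) :
    l.foldl (fun a j => if j ≠ id then a ++ [f j] else a) acc
    = acc ++ (l.filter (fun j => j != id)).map f := by
  have h := PySem.List.foldl_append_if (l := l) (p := fun j => j != id) (f := f) (acc := acc)
  simpa [bne_iff_ne] using h

lemma nonId_eq (row : List String) (id : Int) : mergeNonIdA row id = altNonId row id := by
  unfold mergeNonIdA altNonId
  rw [PySem.List.enumerate_eq_map_pyRange (d := "")]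
  rw [foldl_ite_ne, List.filter_map, List.map_map]
  simp [Function.comp_def]

-- lookup in the fold-built dict = last-match scan carrying the stored value
lemma dict_lookup_eq (data1 : List (List String)) (id : Int) (key : String)
    (g : List String → List String) (d : PySem.Dict String (List String)) :
    (data1.foldl (fun d row => d.insert (PySem.List.pyGetD row id "") (g row)) d).get? key
    = data1.foldl (fun m row => if PySem.List.pyGetD row id "" == key then some (g row) else m) (d.get? key) := by
  induction data1 generalizing d with
  | nil => rfl
  | cons r t ih =>
      simp only [List.foldl_cons, ih, PySem.Dict.get?_insert]
      congr 1
      by_cases h : PySem.List.pyGetD r id "" = key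
      · simp [h]
      · simp [h, Ne.symm h]

-- the scan storing g row is Option.map g of the scan storing row itself
lemma scan_map (data1 : List (List String)) (c : List String → Bool)
    (g : List String → List String) (mo : Option (List String)) :
    data1.foldl (fun m row => if c row then some (g row) else m) (mo.map g)
    = (data1.foldl (fun m row => if c row then some row else m) mo).map g := by
  induction data1 generalizing mo with
  | nil => rfl
  | cons r t ih =>
      simp only [List.foldl_cons]
      by_cases h : c r
      · simpa [h] using ih (some r)
      · simp [h, ih mo]

-- A's inner append loop is plain list append
lemma inner_append (val data : List String) :
    (PySem.List.pyRange 0 (PySem.List.len val) 1).foldl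
      (fun d j => d ++ [PySem.List.pyGetD val j ""]) data = data ++ val := by
  have h := PySem.List.foldl_pyRange_zero_pyGetD (xs := val) (d := "")
    (f := fun acc x => acc ++ [x]) (init := data)
  rw [h, PySem.List.foldl_append_singleton_eq_self]

theorem merge_data_by_map_spec : Claim_equal_merge_data_by_map := by
  intro data1 data2 head1 head2 i1 i2 _ _
  unfold Spec_merge_data_by_map merge_data_by_map merge_data_by_map_alt
  apply List.foldl_ext
  intro datas row _
  show (match (data1.foldl (fun d r => d.insert (PySem.List.pyGetD r i1 "") (mergeNonIdA r i1))
        PySem.Dict.empty).get? (PySem.List.pyGetD row i2 "") with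
    | some val => datas ++ [(PySem.List.pyRange 0 (PySem.List.len val) 1).foldl
        (fun d j => d ++ [PySem.List.pyGetD val j ""]) row]
    | none => datas)
    = (match altLastMatch data1 i1 (PySem.List.pyGetD row i2 "") with
    | some m => datas ++ [row ++ altNonId m i1]
    | none => datas)
  rw [dict_lookup_eq data1 i1 _ (fun r => mergeNonIdA r i1) PySem.Dict.empty]
  rw [PySem.Dict.get?_empty]
  have hscan : data1.foldl (fun m r =>
      if PySem.List.pyGetD r i1 "" == PySem.List.pyGetD row i2 "" then some (mergeNonIdA r i1) else m) none
      = (altLastMatch data1 i1 (PySem.List.pyGetD row i2 "")).map (fun r => mergeNonIdA r i1) := by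
    rw [show (none : Option (List String)) = Option.map (fun r => mergeNonIdA r i1) none from rfl]
    rw [scan_map data1 _ (fun r => mergeNonIdA r i1) none]
    rfl
  rw [hscan]
  cases altLastMatch data1 i1 (PySem.List.pyGetD row i2 "") with
  | none => rfl
  | some m => simp only [Option.map_some, inner_append, nonId_eq]
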